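-- pv_equiv track=rewrite | github.com/Siphlygon/XenoverseWikiScripts | locations.py | _merge_same_location_data
-- ===== SOURCE A (Python) =====
-- def _merge_same_location_data(all_zone_data):
--     """
--     Merge different zone datas for the same location.
--
--     Any location may have multiple zones, and although many have duplicate encounter tables, not all do. This function
--     merges the data for the same location, keeping only the highest encounter rarity for display purposes. A dictionary
--     is used to weight the rarity of the encounters such that the most common rarity is displayed.
--
--     :param  list[list[str | tuple[str, str]]] all_zone_data: The list of all zone data.
--     :return dict[tuple[str, str], str]: The merged location data.
--     """
--     location_data = {}
--     rarity_weight = {"Common": 3, "Uncommon": 2, "Rare": 1}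
--     for zone in all_zone_data:
--         if zone[1] in location_data:
--             if rarity_weight[zone[0]] > rarity_weight[location_data[zone[1]]]:
--                 location_data[zone[1]] = zone[0]
--         else:
--             location_data[zone[1]] = zone[0]
--
--     return location_data
-- ===== SOURCE B (Python) =====
-- def _merge_same_location_data(all_zone_data):
--     """Group-then-reduce rewrite: collect every rarity per location, then pick the
--     heaviest rarity of each group with an explicit running-best scan."""
--     rarity_weight = {"Common": 3, "Uncommon": 2, "Rare": 1}
--     groups = {}
--     for zone in all_zone_data:
--         groups.setdefault(zone[1], []).append(zone[0])
--     merged = {}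
--     for location, rarities in groups.items():
--         best = rarities[0]
--         for rarity in rarities[1:]:
--             if rarity_weight[rarity] > rarity_weight[best]:
--                 best = rarity
--         merged[location] = best
--     return merged
-- ===== Notes on version B (the rewrite author's own statement) =====
-- stated objective: alternative
-- what changed: Replaces A's single-pass running-max dict accumulator by a two-phase group-then-reduce: first collect every rarity string per location into a groups dict, then reduce each group with an explicit running-best scan.
import Mathlib
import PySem

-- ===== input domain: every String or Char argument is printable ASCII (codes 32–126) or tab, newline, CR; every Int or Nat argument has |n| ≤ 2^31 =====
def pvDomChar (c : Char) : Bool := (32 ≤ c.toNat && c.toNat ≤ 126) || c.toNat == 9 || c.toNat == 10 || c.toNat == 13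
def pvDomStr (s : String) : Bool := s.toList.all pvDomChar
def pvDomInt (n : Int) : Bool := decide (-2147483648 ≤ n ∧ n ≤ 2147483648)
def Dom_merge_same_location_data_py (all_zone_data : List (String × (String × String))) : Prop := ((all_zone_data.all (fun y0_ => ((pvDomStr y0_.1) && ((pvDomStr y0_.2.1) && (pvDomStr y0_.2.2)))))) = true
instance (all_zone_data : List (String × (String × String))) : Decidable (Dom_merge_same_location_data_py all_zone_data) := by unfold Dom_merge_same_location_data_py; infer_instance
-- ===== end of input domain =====

-- B replaces A's running-max dict accumulator by a group-then-reduce decomposition (same cost, alternative structure).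

-- ===== PORT A =====
def pvRarityWeightA : PySem.Dict String Int :=
  PySem.Dict.ofList [("Common", 3), ("Uncommon", 2), ("Rare", 1)]

-- A's loop body: keep the stored rarity unless the new one weighs strictly more.
-- rarity_weight[x] is ported as .getD x 0: exact on Pre_ (every looked-up rarity is a key; Python raises KeyError otherwise).
def pvStepA (d : PySem.Dict (String × String) String) (zone : String × (String × String)) :
    PySem.Dict (String × String) String :=
  if d.contains zone.2 then
    if pvRarityWeightA.getD zone.1 0 > pvRarityWeightA.getD (d.getD zone.2 "") 0 then
      d.insert zone.2 zone.1
    else d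
  else d.insert zone.2 zone.1

def merge_same_location_data_py (all_zone_data : List (String × (String × String))) :
    List (String × String × String) :=
  (all_zone_data.foldl pvStepA PySem.Dict.empty).items.map (fun p => (p.1.1, p.1.2, p.2))

-- ===== PORT B =====
def pvRarityWeightB : PySem.Dict String Int :=
  PySem.Dict.ofList [("Common", 3), ("Uncommon", 2), ("Rare", 1)]

-- phase 1 of Source B: groups.setdefault(zone[1], []).append(zone[0])
def pvGroups (all_zone_data : List (String × (String × String))) :
    PySem.Dict (String × String) (List String) :=
  all_zone_data.foldl (fun d zone => d.modify zone.2 [] (· ++ [zone.1])) PySem.Dict.empty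

-- phase 2 of Source B: best = rarities[0]; for rarity in rarities[1:]: …
-- (groups values are never empty; the [] case is unreachable and returns "")
def pvBest : List String → String
  | [] => ""
  | r :: rs =>
    rs.foldl (fun best rarity =>
      if pvRarityWeightB.getD rarity 0 > pvRarityWeightB.getD best 0 then rarity else best) r

def merge_same_location_data_py_alt (all_zone_data : List (String × (String × String))) :
    List (String × String × String) :=
  (pvGroups all_zone_data).items.map (fun p => (p.1.1, p.1.2, pvBest p.2))

-- ===== PRECONDITION & SPEC =====
-- Pre_ is exactly where Python A returns: a zone whose location occurs more than once must carry a known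
-- rarity (otherwise rarity_weight[...] raises KeyError in A, and in B alike); zones of a unique location
-- never reach the weight lookup in either program.
def Pre_merge_same_location_data_py (all_zone_data : List (String × (String × String))) : Prop :=
  ∀ zone ∈ all_zone_data,
    zone.1 = "Common" ∨ zone.1 = "Uncommon" ∨ zone.1 = "Rare" ∨
      (all_zone_data.map Prod.snd).count zone.2 = 1
instance (all_zone_data : List (String × (String × String))) : Decidable (Pre_merge_same_location_data_py all_zone_data) := by unfold Pre_merge_same_location_data_py; infer_instance

def pvWitness_merge_same_location_data_py : (List (String × (String × String))) :=
  [("Rare", ("Route 1", "Land")), ("Common", ("Route 1", "Land")), ("Uncommon", ("Cave", "Water"))]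

def Spec_merge_same_location_data_py (all_zone_data : List (String × (String × String))) (out : List (String × String × String)) : Prop := out = merge_same_location_data_py_alt all_zone_data
instance (all_zone_data : List (String × (String × String))) (out : List (String × String × String)) : Decidable (Spec_merge_same_location_data_py all_zone_data out) := by unfold Spec_merge_same_location_data_py; infer_instance

-- ===== CLAIM (what is proved, stated in full; the proofs are below) =====
def Claim_equal_merge_same_location_data_py : Prop := ∀ (all_zone_data : List (String × (String × String))), Dom_merge_same_location_data_py all_zone_data → Pre_merge_same_location_data_py all_zone_data → Spec_merge_same_location_data_py all_zone_data (merge_same_location_data_py all_zone_data)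

-- ===== LEMMAS AND PROOFS =====

-- the value-side map linking the two accumulators
def pvMapV (g : PySem.Dict (String × String) (List String)) : PySem.Dict (String × String) String :=
  PySem.Dict.mk (g.items.map (fun p => (p.1, pvBest p.2)))

theorem pvMapV_get? (g : PySem.Dict (String × String) (List String)) (k : String × String) :
    (pvMapV g).get? k = (g.get? k).map pvBest := by
  obtain ⟨l⟩ := g
  induction l with
  | nil => rfl
  | cons p t ih =>
    show (PySem.Dict.mk ((p.1, pvBest p.2) :: t.map _)).get? k = _
    rw [PySem.Dict.get?_mk_cons, PySem.Dict.get?_mk_cons]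
    by_cases h : p.1 == k
    · simp [h]
    · simp only [h, Bool.false_eq_true, if_false]
      exact ih

theorem pvMapV_contains (g : PySem.Dict (String × String) (List String)) (k : String × String) :
    (pvMapV g).contains k = g.contains k := by
  rw [PySem.Dict.contains_eq_isSome_get?, PySem.Dict.contains_eq_isSome_get?, pvMapV_get?]
  cases g.get? k <;> rfl

theorem pvMapV_keys (g : PySem.Dict (String × String) (List String)) :
    (pvMapV g).keys = g.keys := by
  simp only [PySem.Dict.keys, pvMapV, List.map_map]
  rfl

theorem pvBest_append (r : String) (rs : List String) (x : String) :
    pvBest ((r :: rs) ++ [x]) =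
      if pvRarityWeightB.getD x 0 > pvRarityWeightB.getD (pvBest (r :: rs)) 0 then x
      else pvBest (r :: rs) := by
  simp [pvBest, List.foldl_append]

-- the groups step (modify) is definitionally an insert
theorem pvModify_eq_insert (g : PySem.Dict (String × String) (List String))
    (k : String × String) (x : String) :
    g.modify k [] (· ++ [x]) = g.insert k (g.getD k [] ++ [x]) := rfl

theorem pvMapV_insert (g : PySem.Dict (String × String) (List String))
    (k : String × String) (rs : List String) :
    pvMapV (g.insert k rs) = (pvMapV g).insert k (pvBest rs) := by
  apply PySem.Dict.ext
  show (g.insert k rs).items.map _ = ((pvMapV g).insert k (pvBest rs)).items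
  by_cases hc : g.contains k = true
  · rw [PySem.Dict.items_insert_of_contains _ _ hc,
      PySem.Dict.items_insert_of_contains _ _ (by rw [pvMapV_contains]; exact hc)]
    show _ = (g.items.map _).map _
    rw [List.map_map, List.map_map]
    apply List.map_congr_left
    intro p _
    by_cases h : p.1 == k <;> simp [Function.comp, h]
  · rw [PySem.Dict.items_insert_of_not_contains _ _ (by simp at hc; exact hc),
      PySem.Dict.items_insert_of_not_contains _ _
        (by rw [pvMapV_contains]; simp at hc; exact hc)]
    show _ = (pvMapV g).items ++ _
    simp [pvMapV]

-- one step of A on the mapped dict equals the mapped groups step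
theorem pvStep_commute (g : PySem.Dict (String × String) (List String))
    (hnd : g.keys.Nodup) (hne : ∀ p ∈ g.items, p.2 ≠ [])
    (zone : String × (String × String)) :
    pvStepA (pvMapV g) zone = pvMapV (g.modify zone.2 [] (· ++ [zone.1])) := by
  rw [pvModify_eq_insert, pvMapV_insert]
  unfold pvStepA
  rw [pvMapV_contains]
  by_cases hc : g.contains zone.2 = true
  · -- the location is already grouped: its group is nonempty
    obtain ⟨rs, hrs⟩ : ∃ rs, g.get? zone.2 = some rs := by
      have := PySem.Dict.contains_eq_isSome_get? (d := g) (k := zone.2)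
      rw [hc] at this
      cases h : g.get? zone.2
      · rw [h] at this; simp at this
      · exact ⟨_, rfl⟩
    have hmem : (zone.2, rs) ∈ g.items := PySem.Dict.mem_items_of_get?_eq_some _ hrs
    have hrsne : rs ≠ [] := hne _ hmem
    obtain ⟨r, rs', rfl⟩ : ∃ r rs', rs = r :: rs' := by
      cases rs with
      | nil => exact absurd rfl hrsne
      | cons a b => exact ⟨a, b, rfl⟩
    have hgetD : g.getD zone.2 [] = r :: rs' := PySem.Dict.getD_of_get?_eq_some _ _ hrs
    have hgetDA : (pvMapV g).getD zone.2 "" = pvBest (r :: rs') := by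
      rw [PySem.Dict.getD_eq_get?_getD, pvMapV_get?, hrs]; rfl
    rw [hc, if_pos rfl, hgetDA, hgetD, pvBest_append]
    have hw : pvRarityWeightA = pvRarityWeightB := rfl
    rw [hw]
    by_cases hgt : pvRarityWeightB.getD zone.1 0 > pvRarityWeightB.getD (pvBest (r :: rs')) 0
    · rw [if_pos hgt, if_pos hgt]
    · rw [if_neg hgt, if_neg hgt]
      -- inserting the value that is already stored leaves the dict unchanged
      apply PySem.Dict.ext
      rw [PySem.Dict.items_insert_of_contains _ _ (by rw [pvMapV_contains]; exact hc)]
      conv_lhs => rw [← List.map_id ((pvMapV g).items)]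
      apply List.map_congr_left
      intro p hp
      by_cases h : p.1 == zone.2
      · have hk : p.1 = zone.2 := by simpa using h
        have hv : (pvMapV g).get? p.1 = some p.2 :=
          PySem.Dict.get?_of_mem_items _ hp (by rw [pvMapV_keys]; exact hnd)
        rw [hk, pvMapV_get?, hrs] at hv
        simp only [Option.map_some] at hv
        simp [Prod.ext_iff, hk, (Option.some.inj hv).symm]
      · simp [h]
  · simp only [hc, Bool.false_eq_true, if_false]
    have : g.getD zone.2 [] = [] :=
      PySem.Dict.getD_of_not_contains _ _ (by simpa using hc)
    rw [this]
    rfl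

theorem pvNe_preserved (g : PySem.Dict (String × String) (List String))
    (hne : ∀ p ∈ g.items, p.2 ≠ []) (zone : String × (String × String)) :
    ∀ p ∈ (g.modify zone.2 [] (· ++ [zone.1])).items, p.2 ≠ [] := by
  intro p hp
  rw [pvModify_eq_insert] at hp
  rcases (PySem.Dict.mem_items_insert _ _ _ _).mp hp with h | ⟨h, _⟩
  · subst h; simp
  · exact hne _ h

theorem pvNodup_preserved (g : PySem.Dict (String × String) (List String))
    (hnd : g.keys.Nodup) (zone : String × (String × String)) :
    (g.modify zone.2 [] (· ++ [zone.1])).keys.Nodup := by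
  rw [pvModify_eq_insert]
  exact PySem.Dict.nodup_keys_insert _ _ _ hnd

theorem pvFold_commute (l : List (String × (String × String)))
    (g : PySem.Dict (String × String) (List String))
    (hnd : g.keys.Nodup) (hne : ∀ p ∈ g.items, p.2 ≠ []) :
    l.foldl pvStepA (pvMapV g) =
      pvMapV (l.foldl (fun d zone => d.modify zone.2 [] (· ++ [zone.1])) g) := by
  induction l generalizing g with
  | nil => rfl
  | cons z t ih =>
    simp only [List.foldl_cons]
    rw [pvStep_commute g hnd hne z]
    exact ih _ (pvNodup_preserved g hnd z) (pvNe_preserved g hne z)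

-- ===== VERDICT (by name: the statement is the Claim_ definition above) =====
theorem merge_same_location_data_py_spec : Claim_equal_merge_same_location_data_py := by
  intro all_zone_data _ _
  unfold Spec_merge_same_location_data_py
  unfold merge_same_location_data_py merge_same_location_data_py_alt pvGroups
  rw [show (PySem.Dict.empty : PySem.Dict (String × String) String) = pvMapV PySem.Dict.empty from rfl,
    pvFold_commute _ _ (by simp [PySem.Dict.keys, PySem.Dict.empty]) (by intro p hp; simp [PySem.Dict.empty] at hp)]
  simp [pvMapV, List.map_map, Function.comp]
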